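-- pv_equiv track=rewrite | github.com/apostolovbg/webcam-micro | devcovenant/core/gate_runtime.py | snapshot_row_style
-- ===== SOURCE A (Python) =====
-- def snapshot_row_style(snapshot: dict[str, str]) -> str:
--     """Classify snapshot row style for current-format validation."""
--     if not snapshot:
--         return "empty"
--     tab_counts: list[int] = []
--     for row in snapshot.values():
--         text = str(row).strip()
--         if not text:
--             continue
--         tab_counts.append(text.count("\t"))
--     if not tab_counts:
--         return "empty"
--     if all(count >= 2 for count in tab_counts):
--         return "unsupported_legacy"
--     if all(count == 1 for count in tab_counts):
--         return "filesystem_hash"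
--     return "mixed"
-- ===== SOURCE B (Python) =====
-- def snapshot_row_style(snapshot: dict[str, str]) -> str:
--     """Classify snapshot row style for current-format validation."""
--     seen = 0
--     min_tabs = 0
--     max_tabs = 0
--     for row in snapshot.values():
--         text = str(row).strip()
--         if not text:
--             continue
--         tabs = text.count("\t")
--         if seen == 0:
--             min_tabs = tabs
--             max_tabs = tabs
--         else:
--             if tabs < min_tabs:
--                 min_tabs = tabs
--             if tabs > max_tabs:
--                 max_tabs = tabs
--         seen += 1
--     if seen == 0:
--         return "empty"
--     if min_tabs >= 2:
--         return "unsupported_legacy"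
--     if min_tabs == 1 and max_tabs == 1:
--         return "filesystem_hash"
--     return "mixed"
-- ===== Notes on version B (the rewrite author's own statement) =====
-- stated objective: alternative
-- what changed: Single pass that maintains a seen-counter plus running min/max of per-row tab counts and classifies from those aggregates, instead of materialising a list of counts and rescanning it with two all(...) passes.
import Mathlib
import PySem

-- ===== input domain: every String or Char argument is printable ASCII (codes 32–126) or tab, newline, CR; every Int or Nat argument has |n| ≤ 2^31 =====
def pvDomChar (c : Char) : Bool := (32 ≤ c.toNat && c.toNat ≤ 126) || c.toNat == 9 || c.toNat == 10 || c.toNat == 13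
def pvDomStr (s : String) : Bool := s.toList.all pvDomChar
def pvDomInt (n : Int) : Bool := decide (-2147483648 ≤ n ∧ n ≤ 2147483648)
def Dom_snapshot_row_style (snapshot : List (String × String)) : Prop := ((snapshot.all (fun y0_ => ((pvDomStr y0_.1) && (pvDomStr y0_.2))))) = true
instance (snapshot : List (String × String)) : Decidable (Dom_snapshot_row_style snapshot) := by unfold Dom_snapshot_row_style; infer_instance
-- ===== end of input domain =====

-- B replaces A's counts-list plus two all(...) rescans by one pass keeping a seen-counter and running min/max of tab counts (objective: alternative decomposition, same cost).

-- ===== PORT A =====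
def snapshot_row_style (snapshot : List (String × String)) : String :=
  if snapshot = [] then "empty"
  else
    let tab_counts : List Nat :=
      (PySem.Dict.ofList snapshot).values.foldl
        (fun acc row =>
          let text := PySem.Str.strip row
          if text = "" then acc else acc ++ [PySem.Str.count text "\t"]) []
    if tab_counts = [] then "empty"
    else if tab_counts.all (fun c => 2 ≤ c) then "unsupported_legacy"
    else if tab_counts.all (fun c => c == 1) then "filesystem_hash"
    else "mixed"

-- ===== PORT B =====
def snapshot_row_style_alt (snapshot : List (String × String)) : String :=
  let s :=
    (PySem.Dict.ofList snapshot).values.foldl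
      (fun s row =>
        let text := PySem.Str.strip row
        if text = "" then s
        else
          let tabs := PySem.Str.count text "\t"
          if s.1 = 0 then (1, tabs, tabs)
          else (s.1 + 1,
                if tabs < s.2.1 then tabs else s.2.1,
                if s.2.2 < tabs then tabs else s.2.2))
      ((0, 0, 0) : Nat × Nat × Nat)
  if s.1 = 0 then "empty"
  else if 2 ≤ s.2.1 then "unsupported_legacy"
  else if s.2.1 == 1 && s.2.2 == 1 then "filesystem_hash"
  else "mixed"

-- ===== PRECONDITION & SPEC =====
def Spec_snapshot_row_style (snapshot : List (String × String)) (out : String) : Prop := out = snapshot_row_style_alt snapshot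
instance (snapshot : List (String × String)) (out : String) : Decidable (Spec_snapshot_row_style snapshot out) := by unfold Spec_snapshot_row_style; infer_instance

-- ===== CLAIM (what is proved, stated in full; the proofs are below) =====
def Claim_equal_snapshot_row_style : Prop := ∀ (snapshot : List (String × String)), Dom_snapshot_row_style snapshot → Spec_snapshot_row_style snapshot (snapshot_row_style snapshot)

-- ===== LEMMAS AND PROOFS =====

-- A's fold step (builds the counts list) and B's fold step (seen / min / max).
def pvStepA (acc : List Nat) (row : String) : List Nat :=
  let text := PySem.Str.strip row
  if text = "" then acc else acc ++ [PySem.Str.count text "\t"]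

def pvStepB (s : Nat × Nat × Nat) (row : String) : Nat × Nat × Nat :=
  let text := PySem.Str.strip row
  if text = "" then s
  else
    let tabs := PySem.Str.count text "\t"
    if s.1 = 0 then (1, tabs, tabs)
    else (s.1 + 1,
          if tabs < s.2.1 then tabs else s.2.1,
          if s.2.2 < tabs then tabs else s.2.2)

-- Invariant tying B's aggregate state to A's counts list.
def pvInv (acc : List Nat) (s : Nat × Nat × Nat) : Prop :=
  s.1 = acc.length ∧ (∀ x ∈ acc, s.2.1 ≤ x ∧ x ≤ s.2.2) ∧ (acc ≠ [] → s.2.1 ∈ acc ∧ s.2.2 ∈ acc)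

theorem pvInv_step (acc : List Nat) (s : Nat × Nat × Nat) (row : String)
    (h : pvInv acc s) : pvInv (pvStepA acc row) (pvStepB s row) := by
  obtain ⟨n, mn, mx⟩ := s
  obtain ⟨hlen, hbound, hmem⟩ := h
  dsimp only at hlen hbound hmem
  unfold pvStepA pvStepB pvInv
  by_cases hb : PySem.Str.strip row = ""
  · simp only [if_pos hb]
    exact ⟨hlen, hbound, hmem⟩
  · simp only [if_neg hb]
    set t := PySem.Str.count (PySem.Str.strip row) "\t" with ht
    by_cases h0 : n = 0
    · have hnil : acc = [] := List.length_eq_zero_iff.1 (by omega)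
      subst hnil
      simp only [if_pos h0, List.nil_append]
      refine ⟨rfl, ?_, ?_⟩
      · intro x hx; simp at hx; subst hx; exact ⟨le_refl _, le_refl _⟩
      · intro _; simp
    · have hne : acc ≠ [] := by
        intro hn; subst hn; simp at hlen; omega
      obtain ⟨hmn, hmx⟩ := hmem hne
      have hmnle := hbound _ hmn
      have hmxle := hbound _ hmx
      simp only [if_neg h0]
      refine ⟨by simp [hlen], ?_, ?_⟩
      · intro x hx
        rcases List.mem_append.1 hx with hx | hx
        · have := hbound x hx
          constructor
          · split <;> omega
          · split <;> omega
        · simp at hx; subst hx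
          constructor
          · split <;> omega
          · split <;> omega
      · intro _
        constructor
        · split
          · exact List.mem_append.2 (Or.inr (by simp))
          · exact List.mem_append.2 (Or.inl hmn)
        · split
          · exact List.mem_append.2 (Or.inr (by simp))
          · exact List.mem_append.2 (Or.inl hmx)

theorem pvInv_foldl (vals : List String) (acc : List Nat) (s : Nat × Nat × Nat)
    (h : pvInv acc s) : pvInv (vals.foldl pvStepA acc) (vals.foldl pvStepB s) := by
  induction vals generalizing acc s with
  | nil => exact h
  | cons v vs ih => exact ih _ _ (pvInv_step acc s v h)

-- ===== VERDICT (by name: the statement is the Claim_ definition above) =====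
theorem pvA_eq (snapshot : List (String × String)) :
    snapshot_row_style snapshot =
      (if snapshot = [] then "empty"
       else
         let tab_counts := (PySem.Dict.ofList snapshot).values.foldl pvStepA []
         if tab_counts = [] then "empty"
         else if tab_counts.all (fun c => 2 ≤ c) then "unsupported_legacy"
         else if tab_counts.all (fun c => c == 1) then "filesystem_hash"
         else "mixed") := rfl

theorem pvB_eq (snapshot : List (String × String)) :
    snapshot_row_style_alt snapshot =
      (let s := (PySem.Dict.ofList snapshot).values.foldl pvStepB ((0, 0, 0) : Nat × Nat × Nat)
       if s.1 = 0 then "empty"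
       else if 2 ≤ s.2.1 then "unsupported_legacy"
       else if s.2.1 == 1 && s.2.2 == 1 then "filesystem_hash"
       else "mixed") := rfl

-- ===== VERDICT (by name: the statement is the Claim_ definition above) =====
theorem snapshot_row_style_spec : Claim_equal_snapshot_row_style := by
  intro snapshot _
  unfold Spec_snapshot_row_style
  rw [pvA_eq, pvB_eq]
  by_cases hsnil : snapshot = []
  · subst hsnil; rfl
  · simp only [if_neg hsnil]
    have hinv := pvInv_foldl (PySem.Dict.ofList snapshot).values [] ((0, 0, 0) : Nat × Nat × Nat)
      ⟨rfl, by simp, by simp⟩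
    set acc := (PySem.Dict.ofList snapshot).values.foldl pvStepA [] with hacc
    set s := (PySem.Dict.ofList snapshot).values.foldl pvStepB ((0, 0, 0) : Nat × Nat × Nat) with hs
    obtain ⟨hlen, hbound, hmem⟩ := hinv
    by_cases hanil : acc = []
    · have h0 : s.1 = 0 := by simp [hlen, hanil]
      simp [hanil, h0]
    · obtain ⟨hmn, hmx⟩ := hmem hanil
      have h0 : s.1 ≠ 0 := by
        intro h; exact hanil (List.length_eq_zero_iff.1 (hlen ▸ h))
      simp only [if_neg hanil, if_neg h0]
      by_cases hleg : 2 ≤ s.2.1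
      · have : acc.all (fun c => 2 ≤ c) = true := by
          simp only [List.all_eq_true, decide_eq_true_eq]
          exact fun x hx => le_trans hleg (hbound x hx).1
        simp [this, hleg]
      · have hnall : acc.all (fun c => 2 ≤ c) = false := by
          simp only [List.all_eq_false]
          exact ⟨s.2.1, hmn, by simpa using hleg⟩
        simp only [hnall, if_neg hleg, Bool.false_eq_true, if_false]
        by_cases hfs : s.2.1 = 1 ∧ s.2.2 = 1
        · have : acc.all (fun c => c == 1) = true := by
            simp only [List.all_eq_true, beq_iff_eq]
            intro x hx
            have := hbound x hx
            omega
          simp [this, hfs.1, hfs.2]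
        · have : acc.all (fun c => c == 1) = false := by
            simp only [List.all_eq_false, beq_iff_eq]
            rcases Decidable.not_and_iff_or_not.1 hfs with h | h
            · exact ⟨s.2.1, hmn, h⟩
            · exact ⟨s.2.2, hmx, h⟩
          have hb : (s.2.1 == 1 && s.2.2 == 1) = false := by
            rcases Decidable.not_and_iff_or_not.1 hfs with h | h <;> simp [h]
          simp [this, hb]
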